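-- pv_equiv track=rewrite | github.com/wanbiguizhao/leetcode | 360/repeat_subarray.py | is_repeat_subarray_in_seq
-- ===== SOURCE A (Python) =====
-- def is_repeat_subarray_in_seq(seq:list[int],sub_seq_k:int):
--     if sub_seq_k>=len(seq):
--         return False
--     cache_index={}
--     i=len(seq)-1
--     while i>=0:
--         if seq[i] not in cache_index:
--             cache_index[seq[i]]=-1
--         elif cache_index[seq[i]]==-1:
--             cache_index[seq[i]]=i
--         i=i-1
--     i=len(seq)-1
--     while i>=0:
--         if cache_index[seq[i]]!=-1 and cache_index[seq[i]]>=sub_seq_k-1: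
--             return True
--         i-=1
--     return False
-- ===== SOURCE B (Python) =====
-- def is_repeat_subarray_in_seq(seq: list[int], sub_seq_k: int):
--     if sub_seq_k >= len(seq):
--         return False
--     seen = set()
--     for x in seq[max(0, sub_seq_k - 1):]:
--         if x in seen:
--             return True
--         seen.add(x)
--     return False
-- ===== Notes on version B (the rewrite author's own statement) =====
-- stated objective: simpler
-- what changed: Replaces A's two full passes and second-from-right index table with a single forward duplicate scan over the suffix seq[max(0, sub_seq_k-1):] using a set.
import Mathlib
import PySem

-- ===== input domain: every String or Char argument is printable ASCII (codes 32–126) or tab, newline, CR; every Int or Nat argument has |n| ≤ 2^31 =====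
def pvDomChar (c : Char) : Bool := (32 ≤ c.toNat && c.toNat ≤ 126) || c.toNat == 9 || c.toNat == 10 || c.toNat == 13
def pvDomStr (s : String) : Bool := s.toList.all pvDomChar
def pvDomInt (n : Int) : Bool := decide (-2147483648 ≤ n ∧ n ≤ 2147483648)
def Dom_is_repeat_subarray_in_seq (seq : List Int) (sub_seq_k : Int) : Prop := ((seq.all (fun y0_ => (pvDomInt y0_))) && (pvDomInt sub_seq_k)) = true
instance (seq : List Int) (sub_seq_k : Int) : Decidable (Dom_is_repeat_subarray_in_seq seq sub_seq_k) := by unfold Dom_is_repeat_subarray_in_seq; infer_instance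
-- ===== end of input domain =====

-- B replaces A's two descending passes and second-from-right index table with one forward
-- duplicate scan over the suffix seq[max(0, sub_seq_k-1):] using a set (simpler).

-- ===== PORT A =====
-- first while-loop: cache_index[v] = -1 on first (rightmost) sight, the index on second sight
-- (indices i are drawn from range(len(seq)).reverse, so seq.getD i 0 is exactly seq[i])
def pvABuild (seq : List Int) : List Nat → PySem.Dict Int Int → PySem.Dict Int Int
  | [], d => d
  | i :: rest, d =>
      match d.get? (seq.getD i 0) with
      | none => pvABuild seq rest (d.insert (seq.getD i 0) (-1))
      | some c =>
          if c = -1 then pvABuild seq rest (d.insert (seq.getD i 0) ((i : Int)))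
          else pvABuild seq rest d

-- second while-loop with early return; cache_index[seq[i]] always exists when reached,
-- so getD's default -1 is unreachable
def pvAScan (seq : List Int) (sub_seq_k : Int) (d : PySem.Dict Int Int) : List Nat → Bool
  | [] => false
  | i :: rest =>
      if d.getD (seq.getD i 0) (-1) ≠ -1 ∧ sub_seq_k - 1 ≤ d.getD (seq.getD i 0) (-1) then true
      else pvAScan seq sub_seq_k d rest

def is_repeat_subarray_in_seq (seq : List Int) (sub_seq_k : Int) : Bool :=
  if (seq.length : Int) ≤ sub_seq_k then false
  else
    pvAScan seq sub_seq_k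
      (pvABuild seq (List.range seq.length).reverse PySem.Dict.empty)
      (List.range seq.length).reverse

-- ===== PORT B =====
def pvBScan (seen : PySem.Set Int) : List Int → Bool
  | [] => false
  | x :: rest =>
      if PySem.Set.contains seen x then true
      else pvBScan (PySem.Set.add seen x) rest

def is_repeat_subarray_in_seq_alt (seq : List Int) (sub_seq_k : Int) : Bool :=
  if (seq.length : Int) ≤ sub_seq_k then false
  else pvBScan PySem.Set.empty (PySem.List.slice seq (some (max 0 (sub_seq_k - 1))) none)

-- ===== PRECONDITION & SPEC =====
def Spec_is_repeat_subarray_in_seq (seq : List Int) (sub_seq_k : Int) (out : Bool) : Prop := out = is_repeat_subarray_in_seq_alt seq sub_seq_k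
instance (seq : List Int) (sub_seq_k : Int) (out : Bool) : Decidable (Spec_is_repeat_subarray_in_seq seq sub_seq_k out) := by unfold Spec_is_repeat_subarray_in_seq; infer_instance

-- ===== CLAIM (what is proved, stated in full; the proofs are below) =====
def Claim_equal_is_repeat_subarray_in_seq : Prop := ∀ (seq : List Int) (sub_seq_k : Int), Dom_is_repeat_subarray_in_seq seq sub_seq_k → Spec_is_repeat_subarray_in_seq seq sub_seq_k (is_repeat_subarray_in_seq seq sub_seq_k)

-- ===== LEMMAS AND PROOFS =====

-- the common specification: a duplicated value with both occurrences at index ≥ sub_seq_k - 1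
def pvQ (seq : List Int) (k : Int) : Prop :=
  ∃ p q : Nat, p < q ∧ q < seq.length ∧ seq.getD p 0 = seq.getD q 0 ∧ k - 1 ≤ (p : Int)

-- the descending list of occurrence indices of v that A's first loop sees
def pvOccs (seq : List Int) (v : Int) : List Nat :=
  (List.range seq.length).reverse.filter (fun i => seq.getD i 0 == v)

def pvCacheFold : Option Int → List Nat → Option Int
  | o, [] => o
  | none, _ :: rest => pvCacheFold (some (-1)) rest
  | some c, j :: rest => pvCacheFold (some (if c = -1 then (j : Int) else c)) rest

theorem pvCacheFold_stable (c : Int) (h : c ≠ -1) :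
    ∀ L : List Nat, pvCacheFold (some c) L = some c := by
  intro L
  induction L with
  | nil => rfl
  | cons j rest ih => simp [pvCacheFold, h, ih]

theorem pvABuild_get? (seq : List Int) (v : Int) :
    ∀ (L : List Nat) (d : PySem.Dict Int Int),
      (pvABuild seq L d).get? v
        = pvCacheFold (d.get? v) (L.filter (fun i => seq.getD i 0 == v)) := by
  intro L
  induction L with
  | nil => intro d; rfl
  | cons i rest ih =>
    intro d
    by_cases hv : seq.getD i 0 = v
    · subst hv
      cases hdc : d.get? (seq.getD i 0) with
      | none =>
        simp only [pvABuild, hdc, List.filter_cons, beq_self_eq_true, if_true, ih,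
          PySem.Dict.get?_insert_self, pvCacheFold]
      | some c =>
        by_cases hc : c = -1
        · subst hc
          simp only [pvABuild, hdc, List.filter_cons, beq_self_eq_true, if_true, ih,
            PySem.Dict.get?_insert_self, pvCacheFold]
        · simp only [pvABuild, hdc, List.filter_cons, beq_self_eq_true, if_true, ih,
            pvCacheFold, if_neg hc]
    · have hne : v ≠ seq.getD i 0 := fun h => hv h.symm
      have hfl : List.filter (fun j => seq.getD j 0 == v) (i :: rest)
          = List.filter (fun j => seq.getD j 0 == v) rest := by
        rw [List.filter_cons, if_neg (by simpa using hv)]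
      cases hdc : d.get? (seq.getD i 0) with
      | none =>
        simp only [pvABuild, hdc, hfl, ih, PySem.Dict.get?_insert_of_ne _ _ hne]
      | some c =>
        by_cases hc : c = -1
        · subst hc
          simp only [pvABuild, hdc, if_true, hfl, ih,
            PySem.Dict.get?_insert_of_ne _ _ hne]
        · simp only [pvABuild, hdc, if_neg hc, hfl, ih]

theorem pvAScan_iff (seq : List Int) (k : Int) (d : PySem.Dict Int Int) :
    ∀ M : List Nat,
      pvAScan seq k d M = true
        ↔ ∃ i ∈ M, d.getD (seq.getD i 0) (-1) ≠ -1 ∧ k - 1 ≤ d.getD (seq.getD i 0) (-1) := by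
  intro M
  induction M with
  | nil => simp [pvAScan]
  | cons i rest ih =>
    rw [pvAScan]
    by_cases h : d.getD (seq.getD i 0) (-1) ≠ -1 ∧ k - 1 ≤ d.getD (seq.getD i 0) (-1)
    · rw [if_pos h]
      constructor
      · intro _
        exact ⟨i, List.mem_cons_self, h⟩
      · intro _
        rfl
    · rw [if_neg h, ih]
      constructor
      · rintro ⟨j, hj, hPj⟩
        exact ⟨j, List.mem_cons_of_mem _ hj, hPj⟩
      · rintro ⟨j, hj, hPj⟩
        rcases List.mem_cons.mp hj with rfl | hj'
        · exact absurd hPj h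
        · exact ⟨j, hj', hPj⟩

theorem pvBScan_iff (l : List Int) :
    ∀ seen : PySem.Set Int,
      pvBScan seen l = true ↔ (∃ x ∈ l, x ∈ seen) ∨ ¬ l.Nodup := by
  induction l with
  | nil => simp [pvBScan]
  | cons x rest ih =>
    intro seen
    by_cases h : x ∈ seen
    · rw [pvBScan, (PySem.Set.contains_iff seen x).mpr h, if_pos rfl]
      simp only [true_iff]
      exact Or.inl ⟨x, List.mem_cons_self, h⟩
    · have hc : PySem.Set.contains seen x = false := by
        rw [Bool.eq_false_iff]
        intro hb
        exact h ((PySem.Set.contains_iff seen x).mp hb)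
      rw [pvBScan, hc, if_neg (by simp)]
      rw [ih]
      constructor
      · rintro (⟨y, hy, hmem⟩ | hnd)
        · rcases (PySem.Set.mem_add _ _ _).mp hmem with hmem | rfl
          · exact Or.inl ⟨y, List.mem_cons_of_mem _ hy, hmem⟩
          · exact Or.inr (by simp [List.nodup_cons]; intro hx; exact absurd hy (by simp_all))
        · exact Or.inr (by simp [List.nodup_cons]; intro _; exact hnd)
      · rintro (⟨y, hy, hmem⟩ | hnd)
        · rcases List.mem_cons.mp hy with rfl | hy'
          · exact absurd hmem h
          · exact Or.inl ⟨y, hy', (PySem.Set.mem_add _ _ _).mpr (Or.inl hmem)⟩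
        · rw [List.nodup_cons] at hnd
          push Not at hnd
          by_cases hx : x ∈ rest
          · exact Or.inl ⟨x, hx, (PySem.Set.mem_add _ _ _).mpr (Or.inr rfl)⟩
          · exact Or.inr (hnd hx)

theorem pv_mem_occs {seq : List Int} {v : Int} {i : Nat} :
    i ∈ pvOccs seq v ↔ i < seq.length ∧ seq.getD i 0 = v := by
  simp [pvOccs, List.mem_filter, List.mem_reverse, List.mem_range]

theorem pv_occs_pairwise (seq : List Int) (v : Int) :
    (pvOccs seq v).Pairwise (· > ·) := by
  have h1 : ((List.range seq.length).reverse).Pairwise (· > ·) := by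
    rw [List.pairwise_reverse]
    exact List.pairwise_lt_range
  exact List.Pairwise.sublist List.filter_sublist h1

theorem pv_two_mem_shape {l : List Nat} {a b : Nat}
    (ha : a ∈ l) (hb : b ∈ l) (hne : a ≠ b) :
    ∃ j1 j2 rest, l = j1 :: j2 :: rest := by
  match l with
  | [] => simp at ha
  | [x] =>
    simp at ha hb
    exact absurd (ha.trans hb.symm) hne
  | j1 :: j2 :: rest => exact ⟨j1, j2, rest, rfl⟩

theorem pv_second_ge {j1 j2 : Nat} {rest : List Nat} {x y : Nat}
    (hp : (j1 :: j2 :: rest).Pairwise (· > ·))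
    (hx : x ∈ j1 :: j2 :: rest) (hy : y ∈ j1 :: j2 :: rest) (hxy : x < y) :
    x ≤ j2 := by
  rw [List.pairwise_cons] at hp
  obtain ⟨h1, hp2⟩ := hp
  rw [List.pairwise_cons] at hp2
  obtain ⟨h2, _⟩ := hp2
  have hyle : y ≤ j1 := by
    rcases List.mem_cons.mp hy with rfl | hy'
    · exact le_refl _
    · exact le_of_lt (h1 _ hy')
  have hxne : x ≠ j1 := by omega
  rcases List.mem_cons.mp hx with rfl | hx'
  · omega
  · rcases List.mem_cons.mp hx' with rfl | hx''
    · exact le_refl _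
    · exact le_of_lt (h2 _ hx'')

-- the value A's cache holds for v, in terms of the occurrence list
theorem pv_cache_getD (seq : List Int) (v : Int) :
    (pvABuild seq (List.range seq.length).reverse PySem.Dict.empty).getD v (-1)
      = (pvCacheFold none (pvOccs seq v)).getD (-1) := by
  rw [PySem.Dict.getD_eq_get?_getD, pvABuild_get?, PySem.Dict.get?_empty]
  rfl

theorem pv_A_iff (seq : List Int) (k : Int) (hk : ¬ (seq.length : Int) ≤ k) :
    is_repeat_subarray_in_seq seq k = true ↔ pvQ seq k := by
  rw [is_repeat_subarray_in_seq, if_neg hk, pvAScan_iff]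
  constructor
  · rintro ⟨i, _, hne, hge⟩
    rw [pv_cache_getD] at hne hge
    rcases hocc : pvOccs seq (seq.getD i 0) with _ | ⟨j1, L⟩
    · rw [hocc] at hne; simp [pvCacheFold] at hne
    · rcases L with _ | ⟨j2, rest⟩
      · rw [hocc] at hne; simp [pvCacheFold] at hne
      · have hval : pvCacheFold none (pvOccs seq (seq.getD i 0)) = some (j2 : Int) := by
          rw [hocc]
          show pvCacheFold (some (-1)) (j2 :: rest) = some (j2 : Int)
          rw [show pvCacheFold (some (-1)) (j2 :: rest)
                = pvCacheFold (some (if (-1 : Int) = -1 then (j2 : Int) else -1)) rest from rfl]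
          exact pvCacheFold_stable (j2 : Int) (by omega) rest
        rw [hval] at hge
        simp only [Option.getD_some] at hge
        have hj1 : j1 ∈ pvOccs seq (seq.getD i 0) := by rw [hocc]; simp
        have hj2 : j2 ∈ pvOccs seq (seq.getD i 0) := by rw [hocc]; simp
        have hp := pv_occs_pairwise seq (seq.getD i 0)
        rw [hocc, List.pairwise_cons] at hp
        have hlt : j2 < j1 := hp.1 j2 (by simp)
        obtain ⟨hq1, hv1⟩ := pv_mem_occs.mp hj1
        obtain ⟨_, hv2⟩ := pv_mem_occs.mp hj2
        exact ⟨j2, j1, hlt, hq1, hv2.trans hv1.symm, hge⟩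
  · rintro ⟨p, q, hpq, hq, hval, hkp⟩
    refine ⟨q, by simp [List.mem_range]; omega, ?_⟩
    rw [pv_cache_getD]
    have hpo : p ∈ pvOccs seq (seq.getD q 0) := pv_mem_occs.mpr ⟨by omega, hval⟩
    have hqo : q ∈ pvOccs seq (seq.getD q 0) := pv_mem_occs.mpr ⟨hq, rfl⟩
    obtain ⟨j1, j2, rest, hocc⟩ := pv_two_mem_shape hpo hqo (by omega)
    have hval2 : pvCacheFold none (pvOccs seq (seq.getD q 0)) = some (j2 : Int) := by
      rw [hocc]
      show pvCacheFold (some (-1)) (j2 :: rest) = some (j2 : Int)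
      rw [show pvCacheFold (some (-1)) (j2 :: rest)
            = pvCacheFold (some (if (-1 : Int) = -1 then (j2 : Int) else -1)) rest from rfl]
      rw [if_pos rfl]
      exact pvCacheFold_stable (j2 : Int) (by omega) rest
    have hple : p ≤ j2 := by
      apply pv_second_ge (hocc ▸ pv_occs_pairwise seq (seq.getD q 0)) (hocc ▸ hpo) (hocc ▸ hqo) hpq
    rw [hval2]
    simp only [Option.getD_some]
    constructor
    · omega
    · omega

theorem pv_B_iff (seq : List Int) (k : Int) (hk : ¬ (seq.length : Int) ≤ k) :
    is_repeat_subarray_in_seq_alt seq k = true ↔ pvQ seq k := by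
  rw [is_repeat_subarray_in_seq_alt, if_neg hk,
    PySem.List.slice_from _ (by omega : (0:Int) ≤ max 0 (k - 1)), pvBScan_iff]
  have hm : ((max 0 (k - 1)).toNat : Int) = max 0 (k - 1) := Int.toNat_of_nonneg (by omega)
  set m := (max 0 (k - 1)).toNat with hmdef
  simp only [PySem.Set.empty]
  constructor
  · rintro (⟨x, _, hx⟩ | hnd)
    · simp at hx
    · rw [List.nodup_iff_injective_get] at hnd
      simp only [Function.Injective] at hnd
      push Not at hnd
      obtain ⟨⟨a, hal⟩, ⟨b, hbl⟩, heq, hne⟩ := hnd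
      have hab : a ≠ b := by simpa using hne
      rcases Nat.lt_or_ge a b with h | h
      · refine ⟨m + a, m + b, by omega, by
          have := List.length_drop (l := seq) (i := m); omega, ?_, by omega⟩
        have : seq[m + a]'(by have := List.length_drop (l := seq) (i := m); omega)
             = seq[m + b]'(by have := List.length_drop (l := seq) (i := m); omega) := by
          have ha' := List.getElem_drop (xs := seq) (i := m) (j := a) (h := hal)
          have hb' := List.getElem_drop (xs := seq) (i := m) (j := b) (h := hbl)
          simp only [List.get_eq_getElem] at heq
          rw [← ha', ← hb', heq]
        rw [List.getD_eq_getElem, List.getD_eq_getElem]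
        · exact this
      · have h' : b < a := by omega
        refine ⟨m + b, m + a, by omega, by
          have := List.length_drop (l := seq) (i := m); omega, ?_, by omega⟩
        have : seq[m + b]'(by have := List.length_drop (l := seq) (i := m); omega)
             = seq[m + a]'(by have := List.length_drop (l := seq) (i := m); omega) := by
          have ha' := List.getElem_drop (xs := seq) (i := m) (j := a) (h := hal)
          have hb' := List.getElem_drop (xs := seq) (i := m) (j := b) (h := hbl)
          simp only [List.get_eq_getElem] at heq
          rw [← ha', ← hb', heq]
        rw [List.getD_eq_getElem, List.getD_eq_getElem]
        · exact this
  · rintro ⟨p, q, hpq, hq, hval, hkp⟩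
    right
    have hmp : m ≤ p := by omega
    rw [List.nodup_iff_injective_get]
    simp only [Function.Injective]
    push Not
    have hlen := List.length_drop (l := seq) (i := m)
    refine ⟨⟨p - m, by omega⟩, ⟨q - m, by omega⟩, ?_, by simp; omega⟩
    simp only [List.get_eq_getElem]
    have hp' := List.getElem_drop (xs := seq) (i := m) (j := p - m) (h := by omega)
    have hq' := List.getElem_drop (xs := seq) (i := m) (j := q - m) (h := by omega)
    rw [hp', hq']
    have e1 : m + (p - m) = p := by omega
    have e2 : m + (q - m) = q := by omega
    rw [List.getD_eq_getElem seq 0 (by omega : p < seq.length),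
        List.getD_eq_getElem seq 0 hq] at hval
    simp_rw [e1, e2]
    exact hval

-- ===== VERDICT (by name: the statement is the Claim_ definition above) =====
theorem is_repeat_subarray_in_seq_spec : Claim_equal_is_repeat_subarray_in_seq := by
  intro seq k _
  unfold Spec_is_repeat_subarray_in_seq
  by_cases hk : (seq.length : Int) ≤ k
  · rw [is_repeat_subarray_in_seq, is_repeat_subarray_in_seq_alt, if_pos hk, if_pos hk]
  · rw [Bool.eq_iff_iff, pv_A_iff seq k hk, pv_B_iff seq k hk]
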